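-- pv_equiv track=rewrite | github.com/DeepQuantum/DiscordBotPublic | utils/encrypter.py | solvetranspose
-- ===== SOURCE A (Python) =====
-- def solvetranspose(content) -> list:
--     attempts = 100
--     bfkey = 1
--     results = list()
--     while attempts > 0 and bfkey < len(content):
--         result = ""
--         if (len(content) % bfkey != 0):
--             bfkey += 1
--             continue
--         attempts -= 1
--         bars = len(content) / bfkey
--         contentcpy = content
--         for j in range(1, int(bars) + 1):
--             result += contentcpy[::int(bars)]
--             contentcpy = contentcpy[1:]
--         results.append(f"[KEY: {bfkey}]\n{result}")
--         bfkey += 1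
--
--     return results
-- ===== SOURCE B (Python) =====
-- def solvetranspose(content) -> list:
--     n = len(content)
--     results = []
--     attempts = 100
--     for bfkey in range(1, n):
--         if attempts == 0:
--             break
--         if n % bfkey != 0:
--             continue
--         attempts -= 1
--         bars = n // bfkey
--         rows = [content[r * bars:(r + 1) * bars] for r in range(bfkey)]
--         results.append(f"[KEY: {bfkey}]\n" + "".join(row[c] for c in range(bars) for row in rows))
--     return results
-- ===== Notes on version B (the rewrite author's own statement) =====
-- stated objective: faster
-- what changed: A repeatedly stride-slices a shrinking copy of the string (content[::bars], then contentcpy = contentcpy[1:], bars times per key); B builds the grid of bfkey contiguous rows of width bars once per key and reads it column-major, and replaces the while/continue attempt loop by a for over range(1, n) with a break.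
import Mathlib
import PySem

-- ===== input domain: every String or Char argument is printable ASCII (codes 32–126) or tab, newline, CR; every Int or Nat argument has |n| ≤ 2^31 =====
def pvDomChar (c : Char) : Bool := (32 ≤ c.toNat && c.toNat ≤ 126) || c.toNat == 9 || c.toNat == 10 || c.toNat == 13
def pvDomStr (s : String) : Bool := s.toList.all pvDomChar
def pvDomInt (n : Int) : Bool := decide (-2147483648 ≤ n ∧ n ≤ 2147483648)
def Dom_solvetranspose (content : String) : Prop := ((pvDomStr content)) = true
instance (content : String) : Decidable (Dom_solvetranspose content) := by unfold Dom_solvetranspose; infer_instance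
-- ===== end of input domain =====

-- B replaces A's repeated stride-slicing of a shrinking string copy by an explicit
-- row-grid read column-major, one pass per key (objective: faster, as measured by the
-- timing run); same results, same order.

-- ===== PORT A =====
-- 'bars = len(content) / bfkey' is Python float division; bfkey always divides len(content)
-- exactly in this branch and len ≤ 2^31 on Dom, so the float is exact and
-- int(bars) = len(content) // bfkey; ported as integer floor division.
def solvetransposeLoop (cs : List Char) (attempts bfkey : Int) (results : List String) : List String :=
  if _h : attempts > 0 ∧ bfkey < (cs.length : Int) then
    if PySem.Int.mod (cs.length : Int) bfkey ≠ 0 then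
      solvetransposeLoop cs attempts (bfkey + 1) results
    else
      let bars : Int := PySem.Int.floordiv (cs.length : Int) bfkey
      -- for j in range(1, int(bars)+1): result += contentcpy[::int(bars)]; contentcpy = contentcpy[1:]
      -- (step int(bars) is never 0 here, so slice? is always some; getD's default is unreachable)
      let st := (PySem.List.pyRange 1 (bars + 1) 1).foldl
        (fun (st : List Char × List Char) _ =>
          (st.1 ++ (PySem.List.slice? st.2 none none bars).getD [],
           PySem.List.slice st.2 (some 1) none))
        ([], cs)
      solvetransposeLoop cs (attempts - 1) (bfkey + 1)
        (results ++ ["[KEY: " ++ PySem.Int.toStr bfkey ++ "]\n" ++ String.ofList st.1])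
  else results
termination_by ((cs.length : Int) - bfkey).toNat
decreasing_by all_goals omega

def solvetranspose (content : String) : List String :=
  solvetransposeLoop content.toList 100 1 []

-- ===== PORT B =====
-- 'row[c]' is always in range (each row has exactly bars characters), so pyGet? is
-- always some and the filterMap keeps every character, like the Python generator.
def solvetransposeAltLoop (cs : List Char) (n attempts : Int) (keys : List Int) (results : List String) : List String :=
  match keys with
  | [] => results
  | k :: rest =>
    if attempts = 0 then results
    else if PySem.Int.mod n k ≠ 0 then solvetransposeAltLoop cs n attempts rest results
    else
      let bars := PySem.Int.floordiv n k
      let rows := (PySem.List.pyRange 0 k 1).map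
        (fun r => PySem.List.slice cs (some (r * bars)) (some ((r + 1) * bars)))
      let result := ((PySem.List.pyRange 0 bars 1).map
        (fun c => rows.filterMap (fun row => PySem.List.pyGet? row c))).flatten
      solvetransposeAltLoop cs n (attempts - 1) rest
        (results ++ ["[KEY: " ++ PySem.Int.toStr k ++ "]\n" ++ String.ofList result])

def solvetranspose_alt (content : String) : List String :=
  let cs := content.toList
  solvetransposeAltLoop cs (cs.length : Int) 100 (PySem.List.pyRange 1 (cs.length : Int) 1) []

-- ===== PRECONDITION & SPEC =====
def Spec_solvetranspose (content : String) (out : List String) : Prop := out = solvetranspose_alt content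
instance (content : String) (out : List String) : Decidable (Spec_solvetranspose content out) := by unfold Spec_solvetranspose; infer_instance

-- ===== CLAIM (what is proved, stated in full; the proofs are below) =====
def Claim_equal_solvetranspose : Prop := ∀ (content : String), Dom_solvetranspose content → Spec_solvetranspose content (solvetranspose content)

-- ===== LEMMAS AND PROOFS =====

-- column c of the K-row grid of width B over cs, read downwards
def colChunk (cs : List Char) (K B c : Nat) : List Char :=
  (List.range K).filterMap (fun r => cs[r * B + c]?)

-- A's stride-slice of the d-dropped string is exactly column d of the grid
lemma slice?_stride_eq_colChunk (cs : List Char) (K B d : Nat) (hB : 1 ≤ B)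
    (hlen : cs.length = K * B) (hd : d < B) :
    PySem.List.slice? (cs.drop d) none none (B : Int) = some (colChunk cs K B d) := by
  have hstep : (B : Int) ≠ 0 := by omega
  have hlen' : (cs.drop d).length = K * B - d := by simp [hlen]
  simp only [PySem.List.slice?, PySem.List.sliceIndices, hstep, if_false]
  simp only [show ¬((B:Int) < 0) from by omega, if_false, show (0:Int) < (B:Int) from by omega, if_true]
  have hcount : (if 0 < ((List.drop d cs).length : Int)
      then ((((List.drop d cs).length : Int) - 0 + (B : Int) - 1) / (B : Int)).toNat else 0) = K := by
    rcases Nat.eq_zero_or_pos K with hK | hK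
    · subst hK
      have : (List.drop d cs).length = 0 := by omega
      simp [this]
    · have hpos : 0 < ((List.drop d cs).length : Int) := by
        have hKB : B ≤ K * B := Nat.le_mul_of_pos_left _ hK
        have : 0 < (List.drop d cs).length := by omega
        exact_mod_cast this
      rw [if_pos hpos]
      have hcast : (((List.drop d cs).length : Int) - 0 + (B : Int) - 1)
          = (((List.drop d cs).length + B - 1 : Nat) : Int) := by omega
      rw [hcast, ← Int.natCast_ediv, Int.toNat_natCast]
      have hKB : B ≤ K * B := Nat.le_mul_of_pos_left _ hK
      have hsplit : (List.drop d cs).length + B - 1 = (B - 1 - d) + K * B := by omega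
      rw [hsplit, Nat.add_mul_div_right _ _ (by omega : 0 < B),
        Nat.div_eq_of_lt (by omega), Nat.zero_add]
  rw [hcount]
  congr 1
  apply List.filterMap_congr
  intro x hx
  have hidx : ((0 : Int) + (B : Int) * (x : Int)).toNat = B * x := by
    omega
  rw [hidx, List.getElem?_drop]
  have : d + B * x = x * B + d := by ring
  rw [this]

-- A's inner foldl builds the columns d, d+1, …, B-1 in order
lemma foldA_eq (cs : List Char) (K B : Nat) (hB : 1 ≤ B) (hlen : cs.length = K * B) :
    ∀ (t d : Nat) (acc : List Char), d + t = B →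
    ((List.range t).foldl (fun (st : List Char × List Char) (_ : Nat) =>
        (st.1 ++ (PySem.List.slice? st.2 none none (B : Int)).getD [],
         PySem.List.slice st.2 (some 1) none))
      (acc, cs.drop d)).1
    = acc ++ ((List.range t).map (fun i => colChunk cs K B (d + i))).flatten := by
  intro t
  induction t with
  | zero => intro d acc _; simp
  | succ t ih =>
    intro d acc hdt
    rw [List.range_succ_eq_map]
    simp only [List.foldl_cons, List.foldl_map, List.map_cons, List.map_map]
    rw [slice?_stride_eq_colChunk cs K B d hB hlen (by omega)]
    rw [show PySem.List.slice (cs.drop d) (some 1) none = cs.drop (d + 1) from by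
      rw [PySem.List.slice_from_one, List.tail_drop]]
    simp only [Option.getD_some]
    rw [ih (d + 1) (acc ++ colChunk cs K B d) (by omega)]
    have hmap : List.map ((fun i => colChunk cs K B (d + i)) ∘ Nat.succ) (List.range t)
        = List.map (fun i => colChunk cs K B (d + 1 + i)) (List.range t) := by
      apply List.map_congr_left
      intro i _
      simp only [Function.comp_apply]
      congr 1
      omega
    simp only [List.append_assoc, List.flatten_cons, Nat.add_zero, hmap]

-- B's grid read, column-major, is the same list of columns
lemma innerB_eq (cs : List Char) (K B : Nat) :
    ((PySem.List.pyRange 0 (B : Int) 1).map (fun c =>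
      ((PySem.List.pyRange 0 (K : Int) 1).map (fun r =>
          PySem.List.slice cs (some (r * (B : Int))) (some ((r + 1) * (B : Int))))).filterMap
        (fun row => PySem.List.pyGet? row c))).flatten
    = ((List.range B).map (fun i => colChunk cs K B i)).flatten := by
  rw [PySem.List.pyRange_zero_nat, PySem.List.pyRange_zero_nat, List.map_map, List.map_map]
  congr 1
  apply List.map_congr_left
  intro c hc
  have hc' : c < B := List.mem_range.mp hc
  simp only [Function.comp_apply, List.filterMap_map, colChunk]
  apply List.filterMap_congr
  intro r _
  show PySem.List.pyGet? (PySem.List.slice cs (some ((r:Int) * (B:Int))) (some (((r:Int) + 1) * (B:Int)))) (c:Int) = cs[r * B + c]?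
  have h1 : ((r : Int) * (B : Int)) = ((r * B : Nat) : Int) := by push_cast; ring
  have h2 : (((r : Int) + 1) * (B : Int)) = (((r + 1) * B : Nat) : Int) := by push_cast; ring
  rw [h1, h2, PySem.List.slice_natCast, PySem.List.pyGet?_natCast]
  rw [show (r + 1) * B - r * B = B from by rw [Nat.succ_mul]; omega]
  rw [List.getElem?_take, if_pos hc', List.getElem?_drop]

-- the two loops agree, key by key
lemma loop_eq (cs : List Char) :
    ∀ (fuel kn : Nat) (attempts : Int) (results : List String),
    1 ≤ kn → 0 ≤ attempts → fuel = cs.length - kn →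
    solvetransposeLoop cs attempts (kn : Int) results
      = solvetransposeAltLoop cs (cs.length : Int) attempts
          (PySem.List.pyRange (kn : Int) (cs.length : Int) 1) results := by
  intro fuel
  induction fuel with
  | zero =>
    intro kn attempts results hk ha hf
    have hge : cs.length ≤ kn := by omega
    rw [PySem.List.pyRange_one_eq_nil (by exact_mod_cast hge)]
    rw [solvetransposeLoop]
    rw [dif_neg (by omega)]
    rfl
  | succ fuel ih =>
    intro kn attempts results hk ha hf
    have hlt : kn < cs.length := by omega
    rw [PySem.List.pyRange_one_cons (by exact_mod_cast hlt)]
    rw [solvetransposeLoop]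
    rcases eq_or_lt_of_le ha with h0 | hpos
    · -- attempts = 0
      rw [dif_neg (by omega)]
      simp only [solvetransposeAltLoop, if_pos h0.symm]
    · rw [dif_pos ⟨hpos, by exact_mod_cast hlt⟩]
      simp only [solvetransposeAltLoop, if_neg (by omega : ¬ attempts = 0)]
      by_cases hmod : PySem.Int.mod (cs.length : Int) (kn : Int) ≠ 0
      · rw [if_pos hmod, if_pos hmod]
        have hcast : (kn : Int) + 1 = ((kn + 1 : Nat) : Int) := by push_cast; ring
        rw [hcast]
        exact ih (kn + 1) attempts results (by omega) ha (by omega)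
      · rw [if_neg hmod, if_neg hmod]
        have hmod0 : cs.length % kn = 0 := by
          have h2 : ((cs.length % kn : Nat) : Int) = 0 := by
            rw [Int.ofNat_fmod]; exact not_not.mp hmod
          exact_mod_cast h2
        have hdvd : kn ∣ cs.length := Nat.dvd_of_mod_eq_zero hmod0
        have hlen : cs.length = kn * (cs.length / kn) := (Nat.mul_div_cancel' hdvd).symm
        have hB1 : 1 ≤ cs.length / kn := (Nat.one_le_div_iff (by omega)).mpr (le_of_lt hlt)
        have hbars : PySem.Int.floordiv (cs.length : Int) (kn : Int) = ((cs.length / kn : Nat) : Int) :=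
          (Int.ofNat_fdiv _ _).symm
        rw [hbars]
        have hr : PySem.List.pyRange 1 (((cs.length / kn : Nat) : Int) + 1) 1
            = List.map (fun k : Nat => 1 + (k : Int)) (List.range (cs.length / kn)) := by
          have ht : ((cs.length / kn : Nat) : Int) + 1 - 1 = ((cs.length / kn : Nat) : Int) := by omega
          rw [PySem.List.pyRange_one, ht, Int.toNat_natCast]
        rw [hr, List.foldl_map]
        have hfold := foldA_eq cs kn (cs.length / kn) hB1 hlen (cs.length / kn) 0 [] (by omega)
        simp only [List.drop_zero, List.nil_append, Nat.zero_add] at hfold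
        rw [hfold]
        rw [innerB_eq cs kn (cs.length / kn)]
        have hcast : (kn : Int) + 1 = ((kn + 1 : Nat) : Int) := by push_cast; ring
        rw [hcast]
        exact ih (kn + 1) (attempts - 1) _ (by omega) (by omega) (by omega)

-- ===== VERDICT (by name: the statement is the Claim_ definition above) =====
theorem solvetranspose_spec : Claim_equal_solvetranspose := by
  intro content _
  unfold Spec_solvetranspose solvetranspose solvetranspose_alt
  exact loop_eq content.toList (content.toList.length - 1) 1 100 [] le_rfl (by norm_num) rfl
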